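-- pv_equiv track=rewrite | github.com/enveda/sparc-multiomics | sparc_multiomics/MOFA_toolset.py | reverse_features_naming
-- ===== SOURCE A (Python) =====
-- from typing import Dict
--
-- def reverse_features_naming(input_list, split_parameters=Dict[str, str]):
--     """
--     for the MOFA analysis, the feature names are split by a certain character, this function reverses the split
--     :param input_list: The list of features
--     :param split_parameters: The parameters to split the features
--     :return: The reversed feature names
--     """
--     split_gene_list = [x.split(split_parameters["split_by"]) for x in input_list]
--     corrected_gene_list = []
--     for current_gene in split_gene_list:
--         current_name = []
--         found_splitter = False
--         for current_split in current_gene: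
--             for current_splitter in split_parameters["split_when"]:
--                 if current_splitter in current_split:
--                     current_name = ["-".join(current_name)]
--                     found_splitter = True
--             if current_split != "":
--                 current_name.append(current_split)
--         if found_splitter:
--             corrected_gene_list.append("_".join(current_name))
--         else:
--             corrected_gene_list.append("-".join(current_name))
--     return corrected_gene_list
-- ===== SOURCE B (Python) =====
-- from typing import Dict
--
-- def reverse_features_naming(input_list, split_parameters=Dict[str, str]):
--     """Rejoin split feature names segment-wise: find the marker-bearing parts
--     once, fold the segments between consecutive markers into a '-'-joined
--     chunk, then attach everything from the last marker on with '_'."""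
--     sep = split_parameters["split_by"]
--     when = split_parameters["split_when"]
--     result = []
--     for name in input_list:
--         parts = name.split(sep)
--         marks = [i for i, p in enumerate(parts) if any(c in p for c in when)]
--         if not marks:
--             result.append("-".join([p for p in parts if p != ""]))
--             continue
--         chunk = "-".join([p for p in parts[:marks[0]] if p != ""])
--         for prev, nxt in zip(marks, marks[1:]):
--             chunk = "-".join([chunk] + [p for p in parts[prev:nxt] if p != ""])
--         result.append("_".join([chunk] + [p for p in parts[marks[-1]:] if p != ""]))
--     return result
-- ===== Notes on version B (the rewrite author's own statement) =====
-- stated objective: alternative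
-- what changed: Replaces A's stateful running-collapse loop (an accumulator re-joined with a found flag each time a marker character is seen in a part) by a segment-wise plan per name: compute the marker-part indices once, fold the segments between consecutive markers into a '-'-joined chunk, then attach the tail from the last marker with '_'. Pre_ excludes inputs on which A raises (dict missing the split keys, or empty split_by with a nonempty list) and, with them, the empty list with missing keys, where A returns [] only because it never touches the dict while B reads both keys up front.
-- outside the precondition, e.g. on reverse_features_naming([], {}): A returns [], B raises KeyError
import Mathlib
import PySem

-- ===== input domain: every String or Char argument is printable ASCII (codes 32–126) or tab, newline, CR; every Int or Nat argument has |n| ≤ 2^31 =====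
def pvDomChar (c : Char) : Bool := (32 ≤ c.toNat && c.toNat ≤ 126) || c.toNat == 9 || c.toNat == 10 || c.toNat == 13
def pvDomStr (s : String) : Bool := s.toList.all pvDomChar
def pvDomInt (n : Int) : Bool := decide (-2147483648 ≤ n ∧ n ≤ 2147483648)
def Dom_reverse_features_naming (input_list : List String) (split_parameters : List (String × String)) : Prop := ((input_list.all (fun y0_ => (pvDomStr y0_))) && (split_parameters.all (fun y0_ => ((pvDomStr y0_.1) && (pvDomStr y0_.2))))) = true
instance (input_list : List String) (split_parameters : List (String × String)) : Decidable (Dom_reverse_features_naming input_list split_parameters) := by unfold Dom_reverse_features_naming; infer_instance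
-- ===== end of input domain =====

-- B replaces A's running-collapse stateful loop by computing the marker-part indices once
-- and folding the segments between consecutive markers into the chunk (objective: alternative).

-- ===== PORT A =====
-- Python dict[k] on the association list (first match)
def pvGetA (d : List (String × String)) (k : String) : Option String :=
  (d.find? (fun kv => kv.1 == k)).map (·.2)

-- inner loop 'for current_splitter in split_parameters["split_when"]'
def pvAInner (current_split : String) (st : List String × Bool) (current_splitter : Char) :
    List String × Bool :=
  if PySem.Str.isIn (String.ofList [current_splitter]) current_split then
    ([PySem.Str.join "-" st.1], true)
  else st

-- loop body 'for current_split in current_gene'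
def pvAStep (split_when : String) (st : List String × Bool) (current_split : String) :
    List String × Bool :=
  let st1 := split_when.toList.foldl (pvAInner current_split) st
  if current_split != "" then (st1.1 ++ [current_split], st1.2) else st1

-- loop body 'for current_gene in split_gene_list'
def pvAGene (split_when : String) (current_gene : List String) : String :=
  let st := current_gene.foldl (pvAStep split_when) ([], false)
  if st.2 then PySem.Str.join "_" st.1 else PySem.Str.join "-" st.1

def reverse_features_naming (input_list : List String)
    (split_parameters : List (String × String)) : List String :=
  match pvGetA split_parameters "split_by", pvGetA split_parameters "split_when" with
  | some split_by, some split_when =>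
    let split_gene_list := input_list.map (fun x => (PySem.Str.split? x split_by).getD [])
    split_gene_list.foldl (fun corrected g => corrected ++ [pvAGene split_when g]) []
  | _, _ => []

-- ===== PORT B =====
-- Python dict[k] on the association list (first match)
def pvGetB (d : List (String × String)) (k : String) : Option String :=
  (d.find? (fun kv => kv.1 == k)).map (·.2)

-- 'any(c in p for c in when)'
def pvTrig (split_when : String) (p : String) : Bool :=
  split_when.toList.any (fun c => PySem.Str.isIn (String.ofList [c]) p)

-- 'marks = [i for i, p in enumerate(parts) if any(c in p for c in when)]'
def pvMarks (split_when : String) (parts : List String) : List Nat :=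
  ((parts.zipIdx).filter (fun q => pvTrig split_when q.1)).map (·.2)

-- 'chunk = "-".join([chunk] + [p for p in parts[prev:nxt] if p != ""])'
def pvChunkStep (parts : List String) (chunk : String) (pq : Nat × Nat) : String :=
  PySem.Str.join "-" (chunk :: ((parts.drop pq.1).take (pq.2 - pq.1)).filter (fun p => p != ""))

-- per-name body of B's loop
def pvFixOne (split_when : String) (parts : List String) : String :=
  match pvMarks split_when parts with
  | [] => PySem.Str.join "-" (parts.filter (fun p => p != ""))
  | m0 :: rest =>
      let chunk0 := PySem.Str.join "-" ((parts.take m0).filter (fun p => p != ""))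
      let marks := m0 :: rest
      let chunk := (marks.zip marks.tail).foldl (pvChunkStep parts) chunk0
      PySem.Str.join "_"
        (chunk :: (parts.drop (marks.getLast?.getD 0)).filter (fun p => p != ""))

def reverse_features_naming_alt (input_list : List String)
    (split_parameters : List (String × String)) : List String :=
  match pvGetB split_parameters "split_by" with
  | none => []
  | some split_by =>
    match pvGetB split_parameters "split_when" with
    | none => []
    | some split_when =>
        input_list.map (fun name =>
          pvFixOne split_when ((PySem.Str.split? name split_by).getD []))

-- ===== PRECONDITION & SPEC =====
-- Pre_ excludes the inputs where Python A raises — a dict missing the "split_by"/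
-- "split_when" keys (KeyError) or an empty "split_by" value with a nonempty list
-- (ValueError) — and, with them, the empty input list with missing keys, where A
-- returns [] only because its comprehension never touches the dict while B reads
-- both keys up front and raises KeyError.
def Pre_reverse_features_naming (input_list : List String)
    (split_parameters : List (String × String)) : Prop :=
  ((split_parameters.find? (fun kv => kv.1 == "split_by")).map (·.2)).isSome = true ∧
  ((split_parameters.find? (fun kv => kv.1 == "split_when")).map (·.2)).isSome = true ∧
  (input_list = [] ∨
    (((split_parameters.find? (fun kv => kv.1 == "split_by")).map (·.2)).getD "" ≠ ""))

instance (input_list : List String) (split_parameters : List (String × String)) :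
    Decidable (Pre_reverse_features_naming input_list split_parameters) := by
  unfold Pre_reverse_features_naming; infer_instance

def pvWitness_reverse_features_naming : List String × (List (String × String)) :=
  (["GENE-12!-ab"], [("split_by", "-"), ("split_when", "!")])

def Spec_reverse_features_naming (input_list : List String) (split_parameters : List (String × String)) (out : List String) : Prop := out = reverse_features_naming_alt input_list split_parameters
instance (input_list : List String) (split_parameters : List (String × String)) (out : List String) : Decidable (Spec_reverse_features_naming input_list split_parameters out) := by unfold Spec_reverse_features_naming; infer_instance

-- ===== CLAIM (what is proved, stated in full; the proofs are below) =====
def Claim_equal_reverse_features_naming : Prop := ∀ (input_list : List String) (split_parameters : List (String × String)), Dom_reverse_features_naming input_list split_parameters → Pre_reverse_features_naming input_list split_parameters → Spec_reverse_features_naming input_list split_parameters (reverse_features_naming input_list split_parameters)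

-- ===== LEMMAS AND PROOFS =====

-- join "-" of a singleton / nil on the String side
lemma pv_join_nil (s : String) : PySem.Str.join s [] = "" := by
  rw [← String.toList_inj]; simp [PySem.Str.toList_join, PySem.Chars.join_nil]

lemma pv_join_single (s x : String) : PySem.Str.join s [x] = x := by
  rw [← String.toList_inj]; simp [PySem.Str.toList_join, PySem.Chars.join_singleton]

lemma pv_cjoin_append (sep : List Char) (L M : List (List Char)) (hL : L ≠ []) (hM : M ≠ []) :
    PySem.Chars.join sep (L ++ M) = PySem.Chars.join sep L ++ sep ++ PySem.Chars.join sep M := by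
  induction L with
  | nil => exact absurd rfl hL
  | cons a t ih =>
    cases t with
    | nil =>
      cases M with
      | nil => exact absurd rfl hM
      | cons b u => simp [PySem.Chars.join_cons_cons, PySem.Chars.join_singleton]
    | cons b t' =>
      have h1 : (a :: b :: t') ++ M = a :: ((b :: t') ++ M) := rfl
      rw [h1, show (b :: t') ++ M = b :: (t' ++ M) from rfl, PySem.Chars.join_cons_cons,
        ← show (b :: t') ++ M = b :: (t' ++ M) from rfl, ih (by simp) , PySem.Chars.join_cons_cons]
      simp [List.append_assoc]

lemma pv_cjoin_collapse (sep : List Char) (L M : List (List Char)) (hL : L ≠ []) :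
    PySem.Chars.join sep (PySem.Chars.join sep L :: M) = PySem.Chars.join sep (L ++ M) := by
  cases M with
  | nil => simp [PySem.Chars.join_singleton]
  | cons b u =>
    rw [PySem.Chars.join_cons_cons, pv_cjoin_append sep L (b :: u) hL (by simp)]

lemma pv_sjoin_collapse (s : String) (L M : List String) (hL : L ≠ []) :
    PySem.Str.join s (PySem.Str.join s L :: M) = PySem.Str.join s (L ++ M) := by
  rw [← String.toList_inj]
  simp only [PySem.Str.toList_join, List.map_cons, List.map_append]
  rw [pv_cjoin_collapse s.toList (L.map String.toList) (M.map String.toList)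
    (by simpa using hL)]

-- the inner char loop collapses the accumulator iff some split_when char occurs
lemma pv_inner_eq (cs : String) (l : List Char) (st : List String × Bool) :
    l.foldl (pvAInner cs) st =
      if l.any (fun c => PySem.Str.isIn (String.ofList [c]) cs) then
        ([PySem.Str.join "-" st.1], true)
      else st := by
  induction l generalizing st with
  | nil => simp
  | cons c t ih =>
    by_cases h : PySem.Str.isIn (String.ofList [c]) cs
    · simp only [List.foldl_cons, pvAInner, h, if_true, List.any_cons, Bool.true_or, ih]
      split <;> simp [pv_join_single]
    · simp only [List.foldl_cons, pvAInner, h, List.any_cons, ih]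
      simp

lemma pv_all_empty_iff (l : List String) :
    l.all (fun p => p == "") = true ↔ l.filter (fun p => p != "") = [] := by
  simp [List.all_eq_true, List.filter_eq_nil_iff]

lemma pv_hits_append (sw : String) (l : List String) (p : String) :
    pvMarks sw (l ++ [p]) = pvMarks sw l ++ (if pvTrig sw p then [l.length] else []) := by
  simp only [pvMarks, List.zipIdx_append, List.filter_append, List.map_append]
  congr 1
  simp [List.zipIdx]
  split <;> simp_all

lemma pv_hits_lt (sw : String) (l : List String) : ∀ j ∈ pvMarks sw l, j < l.length := by
  intro j hj
  simp only [pvMarks, List.mem_map, List.mem_filter] at hj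
  obtain ⟨q, ⟨hq, _⟩, rfl⟩ := hj
  simpa using List.snd_lt_of_mem_zipIdx hq

lemma pv_hits_sorted (sw : String) (l : List String) : (pvMarks sw l).Pairwise (· < ·) := by
  induction l using List.reverseRecOn with
  | nil => simp [pvMarks]
  | append_singleton l p ih =>
    rw [pv_hits_append]
    by_cases hp : pvTrig sw p = true
    · rw [if_pos hp, List.pairwise_append]
      refine ⟨ih, by simp, ?_⟩
      intro a ha b hb
      simp only [List.mem_singleton] at hb
      subst hb
      exact pv_hits_lt sw l a ha
    · rw [if_neg hp, List.append_nil]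
      exact ih

-- zip of (l ++ [x]) with its own tail appends the pair (last l, x)
lemma pv_zip_tail_concat {α : Type} (l : List α) (x : α) (h : l ≠ []) :
    (l ++ [x]).zip ((l ++ [x]).tail) = l.zip l.tail ++ [(l.getLast h, x)] := by
  induction l with
  | nil => exact absurd rfl h
  | cons a t ih =>
    cases t with
    | nil => simp
    | cons b t' =>
      have := ih (by simp)
      simp only [List.cons_append, List.zip_cons_cons, List.tail_cons] at this ⊢
      rw [this]
      simp [List.getLast]

-- the invariant head of A's chunk, phrased on the input
def pvHead (sw : String) (parts : List String) (j : Nat) : List String :=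
  (if (parts.take ((pvMarks sw parts).head?.getD 0)).all (fun p => p == "")
   then [""] else []) ++ (parts.take j).filter (fun p => p != "")

-- the main invariant of A's accumulator loop
lemma pv_inv (sw : String) (l : List String) :
    (match (pvMarks sw l).getLast? with
     | none => l.foldl (pvAStep sw) ([], false) = (l.filter (fun p => p != ""), false)
     | some j =>
         l.foldl (pvAStep sw) ([], false) =
           (PySem.Str.join "-" (pvHead sw l j) :: (l.drop j).filter (fun p => p != ""), true) ∧
         pvHead sw l j ≠ []) := by
  induction l using List.reverseRecOn with
  | nil => simp [pvMarks]
  | append_singleton l p ih =>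
    rw [List.foldl_append, List.foldl_cons, List.foldl_nil]
    by_cases hp : pvTrig sw p = true
    · have hpne : (p != "") = true := by
        rcases eq_or_ne p "" with rfl | hne
        · exfalso
          simp only [pvTrig, List.any_eq_true] at hp
          obtain ⟨c, _, hc⟩ := hp
          rw [PySem.Str.isIn_iff_infix] at hc
          simp at hc
        · simpa using hne
      have hha : pvMarks sw (l ++ [p]) = pvMarks sw l ++ [l.length] := by
        rw [pv_hits_append, hp, if_pos rfl]
      have hglast : (pvMarks sw (l ++ [p])).getLast? = some l.length := by
        rw [hha, List.getLast?_concat]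
      rw [hglast]
      cases hcase : (pvMarks sw l).getLast? with
      | none =>
        have hnil : pvMarks sw l = [] := by
          cases hh : pvMarks sw l with
          | nil => rfl
          | cons a t => rw [hh] at hcase; simp at hcase
        rw [hcase] at ih
        have hhead : pvHead sw (l ++ [p]) l.length =
            (if l.all (fun p => p == "") then [""] else []) ++ l.filter (fun p => p != "") := by
          unfold pvHead
          rw [hha, hnil, List.nil_append, List.head?_cons, Option.getD_some, List.take_left]
        constructor
        · rw [ih]
          unfold pvAStep
          rw [pv_inner_eq]
          simp only [pvTrig] at hp
          rw [if_pos hp, if_pos hpne, hhead, List.drop_left, List.filter_cons,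
            if_pos hpne, List.filter_nil]
          by_cases hall : l.all (fun p => p == "") = true
          · rw [(pv_all_empty_iff l).mp hall]
            simp [hall, pv_join_single, pv_join_nil]
          · simp [hall]
        · rw [hhead]
          by_cases hall : l.all (fun p => p == "") = true
          · simp [hall]
          · rw [if_neg hall, List.nil_append]
            intro hfe
            exact hall ((pv_all_empty_iff l).mpr hfe)
      | some j0 =>
        rw [hcase] at ih
        obtain ⟨ihst, ihne⟩ := ih
        have hne : pvMarks sw l ≠ [] := by
          intro h; rw [h] at hcase; simp at hcase
        obtain ⟨a, t, hat⟩ := List.exists_cons_of_ne_nil hne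
        have hf : (pvMarks sw l).head?.getD 0 < l.length := by
          rw [hat, List.head?_cons, Option.getD_some]
          exact pv_hits_lt sw l a (hat ▸ List.mem_cons_self)
        have hheadsame : (pvMarks sw (l ++ [p])).head?.getD 0 = (pvMarks sw l).head?.getD 0 := by
          rw [hha, hat]; rfl
        have hE : (l ++ [p]).take ((pvMarks sw (l ++ [p])).head?.getD 0) =
            l.take ((pvMarks sw l).head?.getD 0) := by
          rw [hheadsame, List.take_append_of_le_length hf.le]
        have hj0 : j0 < l.length := pv_hits_lt sw l j0 (List.mem_of_getLast? hcase)
        have hhead : pvHead sw (l ++ [p]) l.length =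
            (if (l.take ((pvMarks sw l).head?.getD 0)).all (fun p => p == "") then [""] else []) ++
              l.filter (fun p => p != "") := by
          unfold pvHead
          rw [hE, List.take_left]
        have hsplit : l.filter (fun p => p != "") =
            (l.take j0).filter (fun p => p != "") ++ (l.drop j0).filter (fun p => p != "") := by
          rw [← List.filter_append, List.take_append_drop]
        constructor
        · rw [ihst]
          unfold pvAStep
          rw [pv_inner_eq]
          simp only [pvTrig] at hp
          rw [if_pos hp, if_pos hpne]
          rw [show ((PySem.Str.join "-" (pvHead sw l j0) ::
              (l.drop j0).filter (fun p => p != ""), true) : List String × Bool).1 =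
            PySem.Str.join "-" (pvHead sw l j0) :: (l.drop j0).filter (fun p => p != "") from rfl]
          rw [pv_sjoin_collapse _ _ _ ihne, hhead, List.drop_left, List.filter_cons,
            if_pos hpne, List.filter_nil]
          unfold pvHead
          rw [hsplit, ← List.append_assoc]
          rfl
        · rw [hhead]
          by_cases hall : (l.take ((pvMarks sw l).head?.getD 0)).all (fun p => p == "") = true
          · simp [hall]
          · rw [if_neg hall, List.nil_append]
            intro hfe
            rw [hsplit] at hfe
            have : (l.take j0).filter (fun p => p != "") = [] := (List.append_eq_nil_iff.mp hfe).1
            unfold pvHead at ihne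
            rw [if_neg hall, List.nil_append] at ihne
            exact ihne this
    · have hha : pvMarks sw (l ++ [p]) = pvMarks sw l := by
        rw [pv_hits_append, if_neg hp, List.append_nil]
      rw [hha]
      cases hcase : (pvMarks sw l).getLast? with
      | none =>
        rw [hcase] at ih
        rw [ih]
        unfold pvAStep
        rw [pv_inner_eq]
        simp only [pvTrig] at hp
        rw [if_neg hp, List.filter_append]
        by_cases hpe : (p != "") = true
        · rw [if_pos hpe, List.filter_cons, if_pos hpe, List.filter_nil]
        · rw [if_neg hpe, List.filter_cons, if_neg hpe, List.filter_nil, List.append_nil]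
      | some j0 =>
        rw [hcase] at ih
        obtain ⟨ihst, ihne⟩ := ih
        have hne : pvMarks sw l ≠ [] := by
          intro h; rw [h] at hcase; simp at hcase
        obtain ⟨a, t, hat⟩ := List.exists_cons_of_ne_nil hne
        have hf : (pvMarks sw l).head?.getD 0 < l.length := by
          rw [hat, List.head?_cons, Option.getD_some]
          exact pv_hits_lt sw l a (hat ▸ List.mem_cons_self)
        have hj0 : j0 < l.length := pv_hits_lt sw l j0 (List.mem_of_getLast? hcase)
        have hhead : pvHead sw (l ++ [p]) j0 = pvHead sw l j0 := by
          unfold pvHead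
          rw [hha, List.take_append_of_le_length hj0.le, List.take_append_of_le_length hf.le]
        refine ⟨?_, hhead ▸ ihne⟩
        rw [ihst]
        unfold pvAStep
        rw [pv_inner_eq]
        simp only [pvTrig] at hp
        rw [if_neg hp, hhead, List.drop_append_of_le_length hj0.le, List.filter_append]
        by_cases hpe : (p != "") = true
        · rw [if_pos hpe, List.filter_cons, if_pos hpe, List.filter_nil]
          rfl
        · rw [if_neg hpe, List.filter_cons, if_neg hpe, List.filter_nil, List.append_nil]

-- B's chunk fold over consecutive marker pairs computes join "-" of A's invariant head
lemma pv_chunk_inv (sw : String) (parts : List String) (f : Nat) (rest : List Nat)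
    (hsort : (f :: rest).Pairwise (· < ·)) :
    ((f :: rest).zip (f :: rest).tail).foldl (pvChunkStep parts)
        (PySem.Str.join "-" ((parts.take f).filter (fun p => p != ""))) =
      PySem.Str.join "-"
        ((if (parts.take f).all (fun p => p == "") then [""] else []) ++
          (parts.take ((f :: rest).getLast?.getD 0)).filter (fun p => p != "")) := by
  induction rest using List.reverseRecOn with
  | nil =>
    simp only [List.tail_cons, List.zip_nil_right, List.foldl_nil, List.getLast?_singleton,
      Option.getD_some]
    by_cases hall : (parts.take f).all (fun p => p == "") = true
    · rw [if_pos hall, (pv_all_empty_iff _).mp hall]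
      simp [pv_join_nil, pv_join_single]
    · rw [if_neg hall, List.nil_append]
  | append_singleton r x ih =>
    have hsort' : (f :: r).Pairwise (· < ·) := by
      have h2 := hsort
      rw [show f :: (r ++ [x]) = (f :: r) ++ [x] from rfl, List.pairwise_append] at h2
      exact h2.1
    have hlt : ∀ m ∈ f :: r, m < x := by
      have h2 := hsort
      rw [show f :: (r ++ [x]) = (f :: r) ++ [x] from rfl, List.pairwise_append] at h2
      exact fun m hm => h2.2.2 m hm x (by simp)
    have hzip := pv_zip_tail_concat (f :: r) x (by simp)
    have hlast : (f :: (r ++ [x])).getLast?.getD 0 = x := by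
      rw [show f :: (r ++ [x]) = (f :: r) ++ [x] from rfl, List.getLast?_concat]
      rfl
    rw [hlast, show f :: (r ++ [x]) = (f :: r) ++ [x] from rfl, hzip, List.foldl_append,
      List.foldl_cons, List.foldl_nil, ih hsort']
    set g := (f :: r).getLast (by simp) with hgdef
    have hgsome : (f :: r).getLast? = some g := List.getLast?_eq_some_getLast (by simp)
    have hgD : (f :: r).getLast?.getD 0 = g := by rw [hgsome]; rfl
    rw [hgD]
    have hgmem : g ∈ f :: r := List.mem_of_getLast? hgsome
    have hgx : g < x := hlt g hgmem
    have hfg : f ≤ g := by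
      rcases List.mem_cons.mp hgmem with h2 | h2
      · omega
      · have : f < g := (List.pairwise_cons.mp hsort').1 g h2
        omega
    have hHne : ((if (parts.take f).all (fun p => p == "") then [""] else []) ++
        (parts.take g).filter (fun p => p != "")) ≠ [] := by
      by_cases hall : (parts.take f).all (fun p => p == "") = true
      · simp [hall]
      · rw [if_neg hall, List.nil_append]
        intro hfe
        apply hall
        apply (pv_all_empty_iff _).mpr
        have hpre : parts.take f = (parts.take g).take f := by
          rw [List.take_take, Nat.min_eq_left hfg]
        rw [hpre]
        have hsub : List.Sublist (((parts.take g).take f).filter (fun p => p != ""))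
            ((parts.take g).filter (fun p => p != "")) :=
          List.Sublist.filter _ (List.take_sublist _ _)
        rw [hfe] at hsub
        exact List.sublist_nil.mp hsub
    unfold pvChunkStep
    rw [pv_sjoin_collapse _ _ _ hHne, List.append_assoc, ← List.filter_append]
    congr 3
    rw [← List.take_add (i := g) (j := x - g) (l := parts)]
    congr 1
    omega

-- per-name equality: A's loop computes B's segment-wise plan
lemma pv_gene_eq (sw : String) (parts : List String) :
    pvAGene sw parts = pvFixOne sw parts := by
  have h := pv_inv sw parts
  unfold pvAGene pvFixOne
  cases hm : pvMarks sw parts with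
  | nil =>
    rw [hm] at h
    simp only [List.getLast?_nil] at h
    simp [h]
  | cons m0 rest =>
    rw [hm] at h
    cases hgl : (m0 :: rest).getLast? with
    | none => simp at hgl
    | some j =>
      rw [hgl] at h
      obtain ⟨hst, _⟩ := h
      have hsort : (m0 :: rest).Pairwise (· < ·) := hm ▸ pv_hits_sorted sw parts
      have hchunk := pv_chunk_inv sw parts m0 rest hsort
      have hgD : (m0 :: rest).getLast?.getD 0 = j := by rw [hgl]; rfl
      rw [hgD] at hchunk
      have hhead : pvHead sw parts j =
          (if (parts.take m0).all (fun p => p == "") then [""] else []) ++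
            (parts.take j).filter (fun p => p != "") := by
        unfold pvHead
        rw [hm, List.head?_cons, Option.getD_some]
      simp only [hst, hhead, hchunk, hgD]
      simp

-- ports agree on every input (the match branches line up)
lemma pv_ports_eq (input_list : List String) (split_parameters : List (String × String)) :
    reverse_features_naming input_list split_parameters =
      reverse_features_naming_alt input_list split_parameters := by
  unfold reverse_features_naming reverse_features_naming_alt
  have hAB : pvGetA = pvGetB := rfl
  rw [hAB]
  cases pvGetB split_parameters "split_by" with
  | none => rfl
  | some sb =>
    cases pvGetB split_parameters "split_when" with
    | none => rfl
    | some sw =>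
      simp only [PySem.List.foldl_append_singleton_eq_map, List.map_map]
      exact List.map_congr_left (fun x _ => pv_gene_eq sw _)

-- ===== VERDICT (by name: the statement is the Claim_ definition above) =====
theorem reverse_features_naming_spec : Claim_equal_reverse_features_naming := by
  intro input_list split_parameters _ _
  unfold Spec_reverse_features_naming
  exact pv_ports_eq input_list split_parameters
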